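-- pv_equiv track=rewrite | github.com/matt-hayden/pyxz | console_size.py | condense_string
-- ===== SOURCE A (Python) =====
-- def condense_string(text, width):
-- 	ss = text.split()
-- 	if not ss:
-- 		return text
-- 	mwl = max(len(_) for _ in ss)
-- 	for wl in range(mwl, 2, -1):
-- 		ns = [ _[:wl] for _ in ss ]
-- 		nt = ' '.join(ns)
-- 		if len(nt) < width:
-- 			return nt
-- 	return nt[:width]
-- ===== SOURCE B (Python) =====
-- def condense_string(text, width):
--     ss = text.split()
--     if not ss:
--         return text
--     lens = [len(w) for w in ss]
--     n = len(lens)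
--
--     def total(wl):
--         # length of ' '.join(w[:wl] for w in ss)
--         return sum(L if L < wl else wl for L in lens) + n - 1
--
--     # binary search for the largest wl in [3, max(lens)] with total(wl) < width
--     lo, hi, best = 3, max(lens), 0
--     while lo <= hi:
--         mid = (lo + hi) // 2
--         if total(mid) < width:
--             best = mid
--             lo = mid + 1
--         else:
--             hi = mid - 1
--     if best:
--         return ' '.join(w[:best] for w in ss)
--     return ' '.join(w[:3] for w in ss)[:width]
-- ===== Notes on version B (the rewrite author's own statement) =====
-- stated objective: faster
-- what changed: A rebuilds and joins the truncated words at every candidate width descending from the longest word; B binary-searches the truncation width using an arithmetic total computed from the word lengths alone and builds the joined string once.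
import Mathlib
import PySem

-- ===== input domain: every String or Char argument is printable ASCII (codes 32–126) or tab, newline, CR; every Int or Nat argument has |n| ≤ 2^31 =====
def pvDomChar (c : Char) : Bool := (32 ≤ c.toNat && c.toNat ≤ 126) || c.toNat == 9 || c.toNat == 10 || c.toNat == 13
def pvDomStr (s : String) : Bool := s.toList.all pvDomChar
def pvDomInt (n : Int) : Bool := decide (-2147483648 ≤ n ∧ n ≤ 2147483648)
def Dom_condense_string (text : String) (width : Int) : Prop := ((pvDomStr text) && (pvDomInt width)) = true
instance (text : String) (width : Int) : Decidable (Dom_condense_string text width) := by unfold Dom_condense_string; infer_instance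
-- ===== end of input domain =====

-- B replaces A's descending linear scan (which rebuilds the joined string at every width) by a
-- binary search on the truncation width over arithmetic word-length totals, building the string once.

-- ===== PORT A =====
-- the for-loop of A: iterates over the remaining range, carrying Python's `nt` variable
def condenseLoopA (ss : List String) (width : Int) : List Int → String → String
  | [], nt => PySem.Str.slice nt none (some width)
  | wl :: rest, _nt =>
      let ns := ss.map (fun w => PySem.Str.slice w none (some wl))
      let nt := PySem.Str.join " " ns
      if PySem.Str.len nt < width then nt else condenseLoopA ss width rest nt

def condense_string (text : String) (width : Int) : String :=
  let ss := PySem.Str.split₀ text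
  if ss = [] then text
  else
    let mwl : Int := (PySem.List.max? (ss.map (fun w => PySem.Str.len w)) (fun x => x)).getD 0
    condenseLoopA ss width (PySem.List.pyRange mwl 2 (-1)) ""

-- ===== PORT B =====
-- Source B's total(wl): length of ' '.join(w[:wl] for w in ss), from the word lengths alone
def condenseTotal (lens : List Int) (n : Int) (wl : Int) : Int :=
  (lens.foldl (fun s L => s + (if L < wl then L else wl)) 0) + n - 1

-- Source B's while-loop: binary search for the largest wl in [lo, hi] with total(wl) < width
def condenseSearch (lens : List Int) (n width : Int) (lo hi best : Int) : Int :=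
  if h : lo ≤ hi then
    let mid := PySem.Int.floordiv (lo + hi) 2
    if condenseTotal lens n mid < width then condenseSearch lens n width (mid + 1) hi mid
    else condenseSearch lens n width lo (mid - 1) best
  else best
termination_by (hi + 1 - lo).toNat
decreasing_by
  · have := PySem.Int.floordiv_two_mid_bounds h; omega
  · have := PySem.Int.floordiv_two_mid_bounds h; omega

def condense_string_alt (text : String) (width : Int) : String :=
  let ss := PySem.Str.split₀ text
  if ss = [] then text
  else
    let lens := ss.map (fun w => PySem.Str.len w)
    let n : Int := ss.length
    let best := condenseSearch lens n width 3 ((PySem.List.max? lens (fun x => x)).getD 0) 0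
    if best ≠ 0 then
      PySem.Str.join " " (ss.map (fun w => PySem.Str.slice w none (some best)))
    else
      PySem.Str.slice (PySem.Str.join " " (ss.map (fun w => PySem.Str.slice w none (some 3)))) none (some width)

-- ===== PRECONDITION & SPEC =====
-- Pre_ excludes exactly the inputs where A raises UnboundLocalError: non-blank text all of whose
-- words have length ≤ 2 (the for-loop body never runs, so `nt` is unbound at `return nt[:width]`).
def Pre_condense_string (text : String) (width : Int) : Prop :=
  PySem.Str.split₀ text = [] ∨ ∃ w ∈ PySem.Str.split₀ text, 3 ≤ PySem.Str.len w
instance (text : String) (width : Int) : Decidable (Pre_condense_string text width) := by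
  unfold Pre_condense_string; infer_instance

def pvWitness_condense_string : String × Int := ("hello world", 8)

def Spec_condense_string (text : String) (width : Int) (out : String) : Prop := out = condense_string_alt text width
instance (text : String) (width : Int) (out : String) : Decidable (Spec_condense_string text width out) := by unfold Spec_condense_string; infer_instance

-- ===== CLAIM (what is proved, stated in full; the proofs are below) =====
def Claim_equal_condense_string : Prop := ∀ (text : String) (width : Int), Dom_condense_string text width → Pre_condense_string text width → Spec_condense_string text width (condense_string text width)

-- ===== LEMMAS AND PROOFS =====

-- a foldl accumulating sums is a mapped sum
theorem pvFoldlAddMap {α : Type} (f : α → Int) (l : List α) (c : Int) :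
    l.foldl (fun s x => s + f x) c = c + (l.map f).sum := by
  induction l generalizing c with
  | nil => simp
  | cons x t ih => simp only [List.foldl_cons, List.map_cons, List.sum_cons, ih]; ring

-- length of sep.join over a nonempty list of pieces
theorem pvLenJoin (sep : List Char) (ps : List (List Char)) (h : ps ≠ []) :
    (PySem.Chars.join sep ps).length = (ps.map List.length).sum + sep.length * (ps.length - 1) := by
  induction ps with
  | nil => cases h rfl
  | cons p t ih =>
    cases t with
    | nil => simp [PySem.Chars.join_singleton]
    | cons q r =>
      rw [PySem.Chars.join_cons_cons]
      have := ih (by simp)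
      simp only [List.length_append, List.map_cons, List.sum_cons, List.length_cons,
        Nat.add_sub_cancel, Nat.mul_succ] at this ⊢
      omega

-- length of ' '.join(w[:wl] for w in ss) as Source B's total
theorem pvLenJoinT (ss : List String) (hss : ss ≠ []) (wl : Int) (hwl : 0 ≤ wl) :
    PySem.Str.len (PySem.Str.join " " (ss.map (fun w => PySem.Str.slice w none (some wl))))
      = condenseTotal (ss.map (fun w => PySem.Str.len w)) (ss.length : Int) wl := by
  rw [PySem.Str.len_eq, PySem.Str.toList_join]
  rw [pvLenJoin _ _ (by simpa using hss)]
  unfold condenseTotal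
  rw [pvFoldlAddMap]
  simp only [List.map_map, Function.comp_def, PySem.Str.toList_slice,
    PySem.Chars.slice_eq_listSlice, PySem.List.slice_to _ hwl, List.length_map]
  have hlen : ss.length ≠ 0 := by cases ss with | nil => cases hss rfl | cons a t => simp
  have hmap : (ss.map fun w => ((List.take wl.toNat w.toList).length : Int))
      = ss.map fun w => (if PySem.Str.len w < wl then PySem.Str.len w else wl) := by
    apply List.map_congr_left
    intro w _
    simp only [PySem.Str.len_eq, List.length_take]
    omega
  have h1 : (((ss.map fun x => (List.take wl.toNat x.toList).length).sum : Nat) : Int)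
      = (ss.map fun w => (if PySem.Str.len w < wl then PySem.Str.len w else wl)).sum := by
    rw [← hmap]
    push_cast
    rw [List.map_map]
    rfl
  push_cast [h1] at *
  simp only [List.length_singleton, Nat.cast_one, one_mul]
  omega

-- total is monotone in wl
theorem pvTotalMono (lens : List Int) (n : Int) {wl wl' : Int} (h : wl ≤ wl') :
    condenseTotal lens n wl ≤ condenseTotal lens n wl' := by
  unfold condenseTotal
  rw [pvFoldlAddMap, pvFoldlAddMap]
  have : (lens.map fun L => if L < wl then L else wl).sum ≤ (lens.map fun L => if L < wl' then L else wl').sum := by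
    apply List.sum_le_sum
    intro L _
    split_ifs <;> omega
  omega

-- the reference result: the largest wl in [3, a] with P wl, or 0 if there is none
def condenseG (P : Int → Bool) (a : Int) : Int :=
  if 3 ≤ a then (if P a then a else condenseG P (a - 1)) else 0
termination_by (a - 2).toNat
decreasing_by omega

theorem pvG_zero (P : Int → Bool) {a : Int} (h : a < 3) : condenseG P a = 0 := by
  rw [condenseG]; simp [show ¬ (3 ≤ a) by omega]

theorem pvG_self (P : Int → Bool) {a : Int} (h3 : 3 ≤ a) (hp : P a = true) : condenseG P a = a := by
  rw [condenseG]; simp [h3, hp]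

theorem pvG_pred (P : Int → Bool) {a : Int} (h3 : 3 ≤ a) (hp : P a = false) :
    condenseG P a = condenseG P (a - 1) := by
  rw [condenseG]; simp [h3, hp]

theorem pvG_le (P : Int → Bool) (a : Int) : condenseG P a ≤ max a 0 := by
  fun_induction condenseG P a <;> omega

theorem pvG_nonneg (P : Int → Bool) (a : Int) : 0 ≤ condenseG P a := by
  fun_induction condenseG P a <;> omega

theorem pvG_mono (P : Int → Bool) {a b : Int} (h : a ≤ b) : condenseG P a ≤ condenseG P b := by
  obtain ⟨k, rfl⟩ : ∃ k : ℕ, b = a + k := ⟨(b - a).toNat, by omega⟩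
  clear h
  induction k with
  | zero => simp
  | succ k ih =>
    have step : condenseG P (a + k) ≤ condenseG P (a + (k + 1 : ℕ)) := by
      by_cases h3 : 3 ≤ a + (k + 1 : ℕ)
      · by_cases hp : P (a + (k + 1 : ℕ)) = true
        · rw [pvG_self P h3 hp]
          have := pvG_le P (a + k)
          push_cast at *
          omega
        · rw [pvG_pred P h3 (by simpa using hp)]
          have e : a + ((k + 1 : ℕ) : Int) - 1 = a + k := by push_cast; ring
          rw [e]
      · rw [pvG_zero P (by omega), pvG_zero P (by push_cast at *; omega)]
    exact le_trans ih step

theorem pvG_const (P : Int → Bool) {a b : Int} (hab : a ≤ b)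
    (h : ∀ w, a < w → w ≤ b → P w = false) : condenseG P b = condenseG P a := by
  obtain ⟨k, rfl⟩ : ∃ k : ℕ, b = a + k := ⟨(b - a).toNat, by omega⟩
  clear hab
  induction k with
  | zero => norm_num
  | succ k ih =>
    by_cases h3 : 3 ≤ a + (k + 1 : ℕ)
    · rw [pvG_pred P h3 (h _ (by push_cast; omega) (by push_cast; omega))]
      have e : a + ((k + 1 : ℕ) : Int) - 1 = a + k := by push_cast; ring
      rw [e]
      exact ih (fun w hw1 hw2 => h w hw1 (by push_cast at *; omega))
    · rw [pvG_zero P (by omega), pvG_zero P (by push_cast at *; omega)]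

-- characterization of A's loop
theorem pvLoopA (ss : List String) (hss : ss ≠ []) (width : Int) (a : Int) (ha : 3 ≤ a) (nt : String) :
    condenseLoopA ss width (PySem.List.pyRange a 2 (-1)) nt =
      (if condenseG (fun wl => decide (condenseTotal (ss.map (fun w => PySem.Str.len w)) (ss.length : Int) wl < width)) a = 0
       then PySem.Str.slice (PySem.Str.join " " (ss.map (fun w => PySem.Str.slice w none (some 3)))) none (some width)
       else PySem.Str.join " " (ss.map (fun w => PySem.Str.slice w none
              (some (condenseG (fun wl => decide (condenseTotal (ss.map (fun w => PySem.Str.len w)) (ss.length : Int) wl < width)) a))))) := by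
  obtain ⟨k, rfl⟩ : ∃ k : ℕ, a = 3 + k := ⟨(a - 3).toNat, by omega⟩
  clear ha
  induction k generalizing nt with
  | zero =>
    norm_num
    rw [PySem.List.pyRange_neg_one_cons (by norm_num), PySem.List.pyRange_neg_one_eq_nil (by norm_num)]
    simp only [condenseLoopA]
    rw [pvLenJoinT ss hss 3 (by norm_num)]
    by_cases hT : condenseTotal (ss.map (fun w => PySem.Str.len w)) (ss.length : Int) 3 < width
    · rw [if_pos hT, pvG_self _ (by norm_num) (by simpa using hT)]
      norm_num
    · rw [if_neg hT, pvG_pred _ (by norm_num) (by simpa using hT)]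
      rw [pvG_zero _ (by norm_num)]
      norm_num
  | succ k ih =>
    have h2 : (2 : Int) < 3 + ((k + 1 : ℕ) : Int) := by push_cast; omega
    rw [PySem.List.pyRange_neg_one_cons h2]
    simp only [condenseLoopA]
    rw [pvLenJoinT ss hss _ (by push_cast; omega)]
    by_cases hT : condenseTotal (ss.map (fun w => PySem.Str.len w)) (ss.length : Int) (3 + ((k + 1 : ℕ) : Int)) < width
    · rw [if_pos hT, pvG_self _ (by push_cast; omega) (by simpa using hT)]
      rw [if_neg (by push_cast; omega)]
    · rw [if_neg hT, pvG_pred _ (by push_cast; omega) (by simpa using hT)]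
      have e : 3 + ((k + 1 : ℕ) : Int) - 1 = 3 + (k : ℕ) := by push_cast; ring
      rw [e]
      exact ih _

-- characterization of B's binary search
theorem pvSearch (lens : List Int) (n width : Int)
    (hdc : ∀ v w : Int, v ≤ w → condenseTotal lens n w < width → condenseTotal lens n v < width)
    (lo hi best : Int) (hlo : 3 ≤ lo)
    (hbest : best = condenseG (fun wl => decide (condenseTotal lens n wl < width)) (lo - 1)) :
    condenseSearch lens n width lo hi best =
      max best (condenseG (fun wl => decide (condenseTotal lens n wl < width)) hi) := by
  have H : ∀ m : ℕ, ∀ lo hi best : Int, (hi + 1 - lo).toNat = m → 3 ≤ lo →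
      best = condenseG (fun wl => decide (condenseTotal lens n wl < width)) (lo - 1) →
      condenseSearch lens n width lo hi best =
        max best (condenseG (fun wl => decide (condenseTotal lens n wl < width)) hi) := by
    intro m
    induction m using Nat.strong_induction_on with
    | _ m ih =>
      intro lo hi best hm hlo3 hb
      rw [condenseSearch]
      by_cases h : lo ≤ hi
      · rw [dif_pos h]
        have hmid := PySem.Int.floordiv_two_mid_bounds h
        set mid := PySem.Int.floordiv (lo + hi) 2 with hmiddef
        by_cases hT : condenseTotal lens n mid < width
        · rw [if_pos hT]
          have h1 : condenseG (fun wl => decide (condenseTotal lens n wl < width)) mid = mid :=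
            pvG_self _ (by omega) (by simpa using hT)
          rw [ih ((hi + 1 - (mid + 1)).toNat) (by omega) (mid + 1) hi mid rfl (by omega)
            (by rw [show mid + 1 - 1 = mid by ring, h1])]
          have h2 : condenseG (fun wl => decide (condenseTotal lens n wl < width)) mid ≤
              condenseG (fun wl => decide (condenseTotal lens n wl < width)) hi :=
            pvG_mono _ (by omega)
          have h3 := pvG_le (fun wl => decide (condenseTotal lens n wl < width)) (lo - 1)
          rw [h1] at h2
          omega
        · rw [if_neg hT]
          have hconst : condenseG (fun wl => decide (condenseTotal lens n wl < width)) hi =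
              condenseG (fun wl => decide (condenseTotal lens n wl < width)) (mid - 1) := by
            apply pvG_const _ (by omega)
            intro w hw1 hw2
            simp only [decide_eq_false_iff_not]
            intro hTw
            exact hT (hdc mid w (by omega) hTw)
          rw [ih ((mid - 1 + 1 - lo).toNat) (by omega) lo (mid - 1) best rfl hlo3 hb, hconst]
      · rw [dif_neg h]
        have h2 : condenseG (fun wl => decide (condenseTotal lens n wl < width)) hi ≤
            condenseG (fun wl => decide (condenseTotal lens n wl < width)) (lo - 1) :=
          pvG_mono _ (by omega)
        have h3 := pvG_nonneg (fun wl => decide (condenseTotal lens n wl < width)) hi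
        omega
  exact H _ lo hi best rfl hlo hbest

-- ===== VERDICT (by name: the statement is the Claim_ definition above) =====
theorem condense_string_spec : Claim_equal_condense_string := by
  unfold Claim_equal_condense_string
  intro text width _dom pre
  unfold Spec_condense_string condense_string condense_string_alt
  by_cases hss : PySem.Str.split₀ text = []
  · simp only [hss, if_pos]
  · simp only [hss, if_neg, ite_false]
    obtain ⟨w0, hw0, hw03⟩ : ∃ w ∈ PySem.Str.split₀ text, 3 ≤ PySem.Str.len w := by
      rcases pre with h | h
      · exact absurd h hss
      · exact h
    obtain ⟨m, hm⟩ : ∃ m, PySem.List.max? ((PySem.Str.split₀ text).map (fun w => PySem.Str.len w)) (fun x => x) = some m := by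
      cases hmax : PySem.List.max? ((PySem.Str.split₀ text).map (fun w => PySem.Str.len w)) (fun x => x) with
      | none =>
        rw [PySem.List.max?_eq_none_iff] at hmax
        simp only [List.map_eq_nil_iff] at hmax
        exact absurd hmax hss
      | some m => exact ⟨m, rfl⟩
    have hm3 : 3 ≤ m := by
      have := PySem.List.max?_isMax hm (PySem.Str.len w0) (List.mem_map_of_mem hw0)
      omega
    rw [hm]
    simp only [Option.getD_some]
    have hdc : ∀ v w : Int, v ≤ w →
        condenseTotal ((PySem.Str.split₀ text).map (fun w => PySem.Str.len w)) ((PySem.Str.split₀ text).length : Int) w < width →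
        condenseTotal ((PySem.Str.split₀ text).map (fun w => PySem.Str.len w)) ((PySem.Str.split₀ text).length : Int) v < width := by
      intro v w hvw hT
      exact lt_of_le_of_lt (pvTotalMono _ _ hvw) hT
    rw [pvSearch _ _ _ hdc 3 m 0 (by norm_num) (by rw [show (3:Int) - 1 = 2 by norm_num, pvG_zero _ (by norm_num)])]
    rw [pvLoopA _ hss width m hm3 ""]
    have hnn := pvG_nonneg (fun wl => decide (condenseTotal ((PySem.Str.split₀ text).map (fun w => PySem.Str.len w)) ((PySem.Str.split₀ text).length : Int) wl < width)) m
    rw [max_eq_right hnn]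
    by_cases hg : condenseG (fun wl => decide (condenseTotal ((PySem.Str.split₀ text).map (fun w => PySem.Str.len w)) ((PySem.Str.split₀ text).length : Int) wl < width)) m = 0
    · simp [hg]
    · simp [hg]
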